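-- pv_equiv track=rewrite | github.com/TianJiaJi/ZX-Answering-Assistant-python | src/extraction/importer.py | _calculate_multiple_courses_statistics
-- ===== SOURCE A (Python) =====
-- from typing import Dict, List, Optional
--
-- def _calculate_multiple_courses_statistics(course_list: List[Dict], chapters: List[Dict]) -> Dict:
--     """
--     计算多个课程的统计数据
--
--     Args:
--         course_list: 课程列表
--         chapters: 章节列表
--
--     Returns:
--         Dict: 统计数据
--     """
--     total_courses = len(course_list)
--     total_chapters = len(chapters)
--     total_knowledges = 0
--     total_questions = 0
--     total_options = 0
--
--     for chapter in chapters: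
--         knowledges = chapter.get("knowledges", [])
--         total_knowledges += len(knowledges)
--
--         for knowledge in knowledges:
--             questions = knowledge.get("questions", [])
--             total_questions += len(questions)
--
--             for question in questions:
--                 options = question.get("options", [])
--                 total_options += len(options)
--
--     return {
--         "totalCourses": total_courses,
--         "totalChapters": total_chapters,
--         "totalKnowledges": total_knowledges,
--         "totalQuestions": total_questions,
--         "totalOptions": total_options
--     }
-- ===== SOURCE B (Python) =====
-- def _calculate_multiple_courses_statistics(course_list, chapters):
--     # Explicit-stack (worklist) traversal with level tags instead of nested loops.
--     KN, QU, OP = 0, 1, 2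
--     key = ("knowledges", "questions", "options")
--     counts = [0, 0, 0]
--     stack = [(KN, ch) for ch in chapters]
--     while stack:
--         level, node = stack.pop()
--         children = node.get(key[level], [])
--         counts[level] += len(children)
--         if level < OP:
--             for child in children:
--                 stack.append((level + 1, child))
--     return {
--         "totalCourses": len(course_list),
--         "totalChapters": len(chapters),
--         "totalKnowledges": counts[KN],
--         "totalQuestions": counts[QU],
--         "totalOptions": counts[OP],
--     }
-- ===== Notes on version B (the rewrite author's own statement) =====
-- stated objective: alternative
-- what changed: Replaces A's three nested for-loops with a single while loop over an explicit worklist stack of (level, node) tags, popping nodes and pushing their children, accumulating the three counts in a level-indexed array.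
import Mathlib
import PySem

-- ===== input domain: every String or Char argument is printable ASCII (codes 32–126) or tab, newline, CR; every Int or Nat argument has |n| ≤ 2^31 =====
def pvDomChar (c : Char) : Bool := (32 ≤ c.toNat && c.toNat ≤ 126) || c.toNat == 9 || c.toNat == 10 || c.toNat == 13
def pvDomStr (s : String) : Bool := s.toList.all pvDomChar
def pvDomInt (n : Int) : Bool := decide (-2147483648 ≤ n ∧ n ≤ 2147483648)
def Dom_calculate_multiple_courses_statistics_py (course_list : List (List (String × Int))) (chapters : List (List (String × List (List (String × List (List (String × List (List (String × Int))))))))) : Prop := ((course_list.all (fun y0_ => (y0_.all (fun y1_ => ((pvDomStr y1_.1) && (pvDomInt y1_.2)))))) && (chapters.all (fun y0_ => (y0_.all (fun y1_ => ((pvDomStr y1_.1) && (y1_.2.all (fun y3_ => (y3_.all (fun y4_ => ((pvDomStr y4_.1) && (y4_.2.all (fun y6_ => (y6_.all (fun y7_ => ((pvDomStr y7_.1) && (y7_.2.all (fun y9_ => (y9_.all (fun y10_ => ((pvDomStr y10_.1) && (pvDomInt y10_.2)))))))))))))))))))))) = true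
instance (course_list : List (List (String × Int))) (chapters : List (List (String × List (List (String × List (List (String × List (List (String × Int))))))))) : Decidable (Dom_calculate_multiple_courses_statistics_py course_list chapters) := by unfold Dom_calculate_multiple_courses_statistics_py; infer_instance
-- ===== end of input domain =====

-- B replaces A's three nested for-loops with a single while loop over an explicit worklist
-- stack of level-tagged nodes (alternative decomposition, same linear cost).

-- ===== PORT A =====
-- Shared helper: Python's dict.get(key, default) = first-match lookup in the association list.
def pvGet {α : Type} (d : List (String × α)) (k : String) (dflt : α) : α :=
  (PySem.Dict.mk d).getD k dflt


-- Literal port of A: one fused triple-nested loop over a (knowledges, questions, options) counter triple.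
def calculate_multiple_courses_statistics_py (course_list : List (List (String × Int))) (chapters : List (List (String × List (List (String × List (List (String × List (List (String × Int))))))))) : List (String × Int) :=
  let total_courses : Int := course_list.length
  let total_chapters : Int := chapters.length
  let totals : Int × Int × Int :=
    chapters.foldl (fun acc chapter =>
      let knowledges := pvGet chapter "knowledges" []
      let acc := (acc.1 + knowledges.length, acc.2.1, acc.2.2)
      knowledges.foldl (fun acc knowledge =>
        let questions := pvGet knowledge "questions" []
        let acc := (acc.1, acc.2.1 + questions.length, acc.2.2)
        questions.foldl (fun acc question =>
          let options := pvGet question "options" []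
          (acc.1, acc.2.1, acc.2.2 + options.length)) acc) acc) (0, 0, 0)
  [("totalCourses", total_courses),
   ("totalChapters", total_chapters),
   ("totalKnowledges", totals.1),
   ("totalQuestions", totals.2.1),
   ("totalOptions", totals.2.2)]

-- ===== PORT B =====
-- Python's heterogeneous (level, node) stack entries become one inductive with a constructor
-- per level: kn = (0, chapter), qu = (1, knowledge), op = (2, question).
inductive PvNode : Type
  | kn : List (String × List (List (String × List (List (String × List (List (String × Int))))))) → PvNode
  | qu : List (String × List (List (String × List (List (String × Int))))) → PvNode
  | op : List (String × List (List (String × Int))) → PvNode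

def pvW : PvNode → Nat
  | .op _ => 1
  | .qu k => 1 + (pvGet k "questions" []).length
  | .kn ch => 1 + ((pvGet ch "knowledges" []).map (fun k => 1 + (pvGet k "questions" []).length)).sum

theorem pvW_stack_reverse_append (l rest : List PvNode) :
    ((l.reverse ++ rest).map pvW).sum = (l.map pvW).sum + (rest.map pvW).sum := by
  simp [List.map_append, List.sum_append, List.map_reverse, List.sum_reverse]

def pvLoop : List PvNode → Int × Int × Int → Int × Int × Int
  | [], counts => counts
  | (PvNode.kn ch) :: rest, counts =>
      let children := pvGet ch "knowledges" []
      pvLoop ((children.map PvNode.qu).reverse ++ rest)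
             (counts.1 + children.length, counts.2.1, counts.2.2)
  | (PvNode.qu k) :: rest, counts =>
      let children := pvGet k "questions" []
      pvLoop ((children.map PvNode.op).reverse ++ rest)
             (counts.1, counts.2.1 + children.length, counts.2.2)
  | (PvNode.op q) :: rest, counts =>
      let children := pvGet q "options" []
      pvLoop rest (counts.1, counts.2.1, counts.2.2 + children.length)
termination_by stack _ => (stack.map pvW).sum
decreasing_by
  · rw [pvW_stack_reverse_append]
    have h : List.map pvW (List.map PvNode.qu (pvGet ch "knowledges" []))
        = (pvGet ch "knowledges" []).map (fun k => 1 + (pvGet k "questions" []).length) := by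
      simp [pvW, Function.comp_def]
    simp only [List.map_cons, List.sum_cons, pvW, h]
    omega
  · rw [pvW_stack_reverse_append]
    have h : List.map pvW (List.map PvNode.op (pvGet k "questions" []))
        = (pvGet k "questions" []).map (fun _ => 1) := by
      simp [pvW, Function.comp_def]
    simp only [List.map_cons, List.sum_cons, pvW, h, List.map_const', List.sum_replicate, smul_eq_mul, mul_one]
    omega
  · simp only [List.map_cons, List.sum_cons, pvW]
    omega


-- Port of B: seed the stack with the chapters (last chapter on top), run the worklist loop.
def calculate_multiple_courses_statistics_py_alt (course_list : List (List (String × Int))) (chapters : List (List (String × List (List (String × List (List (String × List (List (String × Int))))))))) : List (String × Int) :=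
  let counts := pvLoop (chapters.map PvNode.kn).reverse (0, 0, 0)
  [("totalCourses", (course_list.length : Int)),
   ("totalChapters", (chapters.length : Int)),
   ("totalKnowledges", counts.1),
   ("totalQuestions", counts.2.1),
   ("totalOptions", counts.2.2)]

-- ===== PRECONDITION & SPEC =====
def Spec_calculate_multiple_courses_statistics_py (course_list : List (List (String × Int))) (chapters : List (List (String × List (List (String × List (List (String × List (List (String × Int))))))))) (out : List (String × Int)) : Prop := out = calculate_multiple_courses_statistics_py_alt course_list chapters
-- type abbreviation (reducible) so the Decidable instance's binders stay readable
abbrev PvChapters : Type := List (List (String × List (List (String × List (List (String × List (List (String × Int))))))))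
instance (course_list : List (List (String × Int))) (chapters : PvChapters) (out : List (String × Int)) : Decidable (Spec_calculate_multiple_courses_statistics_py course_list chapters out) := by unfold Spec_calculate_multiple_courses_statistics_py; infer_instance

-- ===== CLAIM (what is proved, stated in full; the proofs are below) =====
def Claim_equal_calculate_multiple_courses_statistics_py : Prop := ∀ (course_list : List (List (String × Int))) (chapters : List (List (String × List (List (String × List (List (String × List (List (String × Int))))))))), Dom_calculate_multiple_courses_statistics_py course_list chapters → Spec_calculate_multiple_courses_statistics_py course_list chapters (calculate_multiple_courses_statistics_py course_list chapters)

-- ===== LEMMAS AND PROOFS =====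

-- A-side characterisation lemmas for the three nested folds
theorem pv_fold_q (qs : List (List (String × List (List (String × Int))))) (acc : Int × Int × Int) :
    qs.foldl (fun acc question =>
      let options := pvGet question "options" ([] : List (List (String × Int)))
      (acc.1, acc.2.1, acc.2.2 + (options.length : Int))) acc
    = (acc.1, acc.2.1, acc.2.2 + (qs.map (fun q => ((pvGet q "options" ([] : List (List (String × Int)))).length : Int))).sum) := by
  induction qs generalizing acc with
  | nil => simp
  | cons q rest ih => simp [List.foldl, ih, add_assoc]

theorem pv_fold_k (kns : List (List (String × List (List (String × List (List (String × Int))))))) (acc : Int × Int × Int) :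
    kns.foldl (fun acc knowledge =>
      let questions := pvGet knowledge "questions" ([] : List (List (String × List (List (String × Int)))))
      let acc := (acc.1, acc.2.1 + (questions.length : Int), acc.2.2)
      questions.foldl (fun acc question =>
        let options := pvGet question "options" ([] : List (List (String × Int)))
        (acc.1, acc.2.1, acc.2.2 + (options.length : Int))) acc) acc
    = (acc.1,
       acc.2.1 + ((kns.flatMap (fun k => pvGet k "questions" [])).length : Int),
       acc.2.2 + ((kns.flatMap (fun k => pvGet k "questions" [])).map
         (fun q => ((pvGet q "options" ([] : List (List (String × Int)))).length : Int))).sum) := by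
  induction kns generalizing acc with
  | nil => simp
  | cons k rest ih =>
      rw [List.foldl_cons, ih]
      simp only [pv_fold_q, List.flatMap_cons, List.length_append, List.map_append,
        List.sum_append]
      refine Prod.ext ?_ (Prod.ext ?_ ?_) <;> (push_cast; ring_nf)

theorem pv_fold_ch (chs : List (List (String × List (List (String × List (List (String × List (List (String × Int))))))))) (acc : Int × Int × Int) :
    chs.foldl (fun acc chapter =>
      let knowledges := pvGet chapter "knowledges" []
      let acc := (acc.1 + (knowledges.length : Int), acc.2.1, acc.2.2)
      knowledges.foldl (fun acc knowledge =>
        let questions := pvGet knowledge "questions" ([] : List (List (String × List (List (String × Int)))))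
        let acc := (acc.1, acc.2.1 + (questions.length : Int), acc.2.2)
        questions.foldl (fun acc question =>
          let options := pvGet question "options" ([] : List (List (String × Int)))
          (acc.1, acc.2.1, acc.2.2 + (options.length : Int))) acc) acc) acc
    = (acc.1 + ((chs.flatMap (fun ch => pvGet ch "knowledges" [])).length : Int),
       acc.2.1 + (((chs.flatMap (fun ch => pvGet ch "knowledges" [])).flatMap (fun k => pvGet k "questions" [])).length : Int),
       acc.2.2 + (((chs.flatMap (fun ch => pvGet ch "knowledges" [])).flatMap (fun k => pvGet k "questions" [])).map
         (fun q => ((pvGet q "options" ([] : List (List (String × Int)))).length : Int))).sum) := by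
  induction chs generalizing acc with
  | nil => simp
  | cons ch rest ih =>
      rw [List.foldl_cons, ih]
      simp only [pv_fold_k, List.flatMap_cons, List.flatMap_append, List.length_append,
        List.map_append, List.sum_append]
      refine Prod.ext ?_ (Prod.ext ?_ ?_) <;> (push_cast; ring_nf)

-- B-side characterisation: the worklist loop adds each node's total contribution
def pvContrib : PvNode → Int × Int × Int
  | .op q => (0, 0, ((pvGet q "options" []).length : Int))
  | .qu k =>
      let qs := pvGet k "questions" []
      (0, (qs.length : Int), (qs.map (fun q => ((pvGet q "options" []).length : Int))).sum)
  | .kn ch =>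
      let ks := pvGet ch "knowledges" []
      ((ks.length : Int),
       ((ks.flatMap (fun k => pvGet k "questions" [])).length : Int),
       ((ks.flatMap (fun k => pvGet k "questions" [])).map
         (fun q => ((pvGet q "options" []).length : Int))).sum)

def pvCSum (l : List PvNode) : Int × Int × Int :=
  ((l.map (fun n => (pvContrib n).1)).sum,
   (l.map (fun n => (pvContrib n).2.1)).sum,
   (l.map (fun n => (pvContrib n).2.2)).sum)

theorem pvCSum_cons (n : PvNode) (l : List PvNode) :
    pvCSum (n :: l)
      = ((pvContrib n).1 + (pvCSum l).1,
         (pvContrib n).2.1 + (pvCSum l).2.1,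
         (pvContrib n).2.2 + (pvCSum l).2.2) := by
  simp [pvCSum]

theorem pvCSum_reverse_append (l rest : List PvNode) :
    pvCSum (l.reverse ++ rest)
      = ((pvCSum l).1 + (pvCSum rest).1,
         (pvCSum l).2.1 + (pvCSum rest).2.1,
         (pvCSum l).2.2 + (pvCSum rest).2.2) := by
  simp [pvCSum, List.map_append, List.sum_append, List.map_reverse, List.sum_reverse]

theorem pvCSum_map_qu (children : List (List (String × List (List (String × List (List (String × Int))))))) :
    pvCSum (children.map PvNode.qu)
      = (0, ((children.flatMap (fun k => pvGet k "questions" [])).length : Int),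
         ((children.flatMap (fun k => pvGet k "questions" [])).map
           (fun q => ((pvGet q "options" []).length : Int))).sum) := by
  induction children with
  | nil => simp [pvCSum]
  | cons c cs ih =>
      rw [List.map_cons, pvCSum_cons, ih]
      simp [pvContrib, List.flatMap_cons, List.map_append, List.sum_append]
      try push_cast
      try ring

theorem pvCSum_map_op (children : List (List (String × List (List (String × Int))))) :
    pvCSum (children.map PvNode.op)
      = (0, 0, (children.map (fun q => ((pvGet q "options" []).length : Int))).sum) := by
  induction children with
  | nil => simp [pvCSum]
  | cons c cs ih =>
      rw [List.map_cons, pvCSum_cons, ih]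
      simp [pvContrib]

theorem pvLoop_eq (stack : List PvNode) (counts : Int × Int × Int) :
    pvLoop stack counts
      = (counts.1 + (pvCSum stack).1, counts.2.1 + (pvCSum stack).2.1,
         counts.2.2 + (pvCSum stack).2.2) := by
  induction stack, counts using pvLoop.induct with
  | case1 counts => simp [pvLoop, pvCSum]
  | case2 ch rest counts children ih =>
      rw [pvLoop]
      simp only [ih, pvCSum_reverse_append, pvCSum_cons, pvCSum_map_qu, pvContrib, children]
      refine Prod.ext ?_ (Prod.ext ?_ ?_) <;> (simp; try ring)
  | case3 k rest counts children ih =>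
      rw [pvLoop]
      simp only [ih, pvCSum_reverse_append, pvCSum_cons, pvCSum_map_op, pvContrib, children]
      refine Prod.ext ?_ (Prod.ext ?_ ?_) <;> (simp; try ring)
  | case4 q rest counts children ih =>
      rw [pvLoop]
      simp only [ih, pvCSum_cons, pvContrib, children]
      refine Prod.ext ?_ (Prod.ext ?_ ?_) <;> (simp; try ring)

theorem pvCSum_init (chs : List (List (String × List (List (String × List (List (String × List (List (String × Int))))))))) :
    pvCSum (chs.map PvNode.kn).reverse
    = (((chs.flatMap (fun ch => pvGet ch "knowledges" [])).length : Int),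
       (((chs.flatMap (fun ch => pvGet ch "knowledges" [])).flatMap (fun k => pvGet k "questions" [])).length : Int),
       (((chs.flatMap (fun ch => pvGet ch "knowledges" [])).flatMap (fun k => pvGet k "questions" [])).map
         (fun q => ((pvGet q "options" ([] : List (List (String × Int)))).length : Int))).sum) := by
  induction chs with
  | nil => simp [pvCSum]
  | cons ch rest ih =>
      have hrev : pvCSum ((List.map PvNode.kn (ch :: rest)).reverse)
          = ((pvCSum (List.map PvNode.kn rest).reverse).1 + (pvContrib (PvNode.kn ch)).1,
             (pvCSum (List.map PvNode.kn rest).reverse).2.1 + (pvContrib (PvNode.kn ch)).2.1,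
             (pvCSum (List.map PvNode.kn rest).reverse).2.2 + (pvContrib (PvNode.kn ch)).2.2) := by
        simp [pvCSum, List.map_append, List.sum_append]
      rw [hrev, ih]
      simp only [pvContrib, List.flatMap_cons, List.flatMap_append, List.length_append,
        List.map_append, List.sum_append]
      refine Prod.ext ?_ (Prod.ext ?_ ?_) <;> (simp; try ring)

-- ===== VERDICT (by name: the statement is the Claim_ definition above) =====
theorem calculate_multiple_courses_statistics_py_spec : Claim_equal_calculate_multiple_courses_statistics_py := by
  intro course_list chapters _
  unfold Spec_calculate_multiple_courses_statistics_py
  unfold calculate_multiple_courses_statistics_py calculate_multiple_courses_statistics_py_alt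
  simp only [pv_fold_ch, pvLoop_eq, pvCSum_init]
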